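-- pv_equiv track=rewrite | github.com/MrBrantCode/unitest_baseline | mut_generate/mist_train_taco/taco_3688/solution.py | simulate_domino_reaction
-- ===== SOURCE A (Python) =====
-- def simulate_domino_reaction(domino_string: str) -> str:
--     result = ''
--     for i, domino in enumerate(domino_string):
--         if domino == '|':
--             result += '/'
--         else:
--             return result + domino_string[i:]
--     return result
-- ===== SOURCE B (Python) =====
-- def simulate_domino_reaction(domino_string: str) -> str:
--     stripped = domino_string.lstrip('|')
--     return '/' * (len(domino_string) - len(stripped)) + stripped
-- ===== Notes on version B (the rewrite author's own statement) =====
-- stated objective: simpler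
-- what changed: Replaces the indexed scan-and-accumulate loop with early return by a builtin left-strip of the leading bar characters plus one replicate-and-concatenate construction of the result.
import Mathlib
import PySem

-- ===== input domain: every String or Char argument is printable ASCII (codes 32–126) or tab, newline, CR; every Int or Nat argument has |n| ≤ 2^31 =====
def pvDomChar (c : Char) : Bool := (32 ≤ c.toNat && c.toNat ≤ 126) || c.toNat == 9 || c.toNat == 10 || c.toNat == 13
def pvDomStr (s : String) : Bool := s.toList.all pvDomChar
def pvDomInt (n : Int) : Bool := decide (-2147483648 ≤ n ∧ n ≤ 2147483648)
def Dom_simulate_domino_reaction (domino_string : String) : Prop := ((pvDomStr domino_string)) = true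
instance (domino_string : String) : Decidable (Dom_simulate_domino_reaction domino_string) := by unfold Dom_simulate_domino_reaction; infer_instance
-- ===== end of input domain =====

-- B replaces A's indexed scan-and-accumulate loop (with early return) by lstrip('|')
-- plus a single replicate-and-concatenate construction; objective: simpler.

-- ===== PORT A =====
-- A's loop: enumerate the characters, appending '/' per '|'; on the first other
-- character return result + domino_string[i:] (here: the remaining suffix c :: rest).
def pvGoA : List Char → List Char → List Char
  | [], result => result
  | c :: rest, result =>
      if c = '|' then pvGoA rest (result ++ ['/'])
      else result ++ (c :: rest)

def simulate_domino_reaction (domino_string : String) : String :=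
  String.ofList (pvGoA domino_string.toList [])

-- ===== PORT B =====
-- lstrip('|') ported by hand as dropWhile (· == '|') on the code points (exact:
-- Python's lstrip('|') drops exactly the leading '|' characters); '/' * n is
-- List.replicate; len via List.length.
def simulate_domino_reaction_alt (domino_string : String) : String :=
  let stripped := domino_string.toList.dropWhile (· == '|')
  String.ofList (List.replicate (domino_string.toList.length - stripped.length) '/' ++ stripped)

-- ===== PRECONDITION & SPEC =====
def Spec_simulate_domino_reaction (domino_string : String) (out : String) : Prop := out = simulate_domino_reaction_alt domino_string
instance (domino_string : String) (out : String) : Decidable (Spec_simulate_domino_reaction domino_string out) := by unfold Spec_simulate_domino_reaction; infer_instance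

-- ===== CLAIM (what is proved, stated in full; the proofs are below) =====
def Claim_equal_simulate_domino_reaction : Prop := ∀ (domino_string : String), Dom_simulate_domino_reaction domino_string → Spec_simulate_domino_reaction domino_string (simulate_domino_reaction domino_string)

-- ===== LEMMAS AND PROOFS =====

lemma pvGoA_eq (l acc : List Char) :
    pvGoA l acc =
      acc ++ List.replicate (l.length - (l.dropWhile (· == '|')).length) '/' ++
        l.dropWhile (· == '|') := by
  induction l generalizing acc with
  | nil => simp [pvGoA]
  | cons c rest ih =>
    by_cases hc : c = '|'
    · subst hc
      have hle : (rest.dropWhile (· == '|')).length ≤ rest.length :=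
        List.length_dropWhile_le _ _
      simp only [pvGoA, ih, List.dropWhile_cons, beq_self_eq_true, if_pos]
      have : rest.length + 1 - (rest.dropWhile (· == '|')).length =
          (rest.length - (rest.dropWhile (· == '|')).length) + 1 := by omega
      simp [this, List.replicate_succ]
    · have hb : (c == '|') = false := by simp [hc]
      simp [pvGoA, hc, hb]

theorem simulate_domino_reaction_spec : Claim_equal_simulate_domino_reaction := by
  intro s _
  show _ = _
  simp [simulate_domino_reaction, simulate_domino_reaction_alt, pvGoA_eq]
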